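-- pv_equiv track=rewrite | github.com/Bradpalubicki/Legal-AI-system-dev | src/document/compliant_analyzer.py | _generate_learning_objectives
-- ===== SOURCE A (Python) =====
-- from typing import Dict, List, Optional, Any, Tuple
-- from enum import Enum
--
-- class AnalysisType(str, Enum):
--     """Types of educational analysis"""
--     EDUCATIONAL_SUMMARY = "educational_summary"
--     METADATA_EXTRACTION = "metadata_extraction"
--     TIMELINE_ANALYSIS = "timeline_analysis"
--     PROCEDURAL_OVERVIEW = "procedural_overview"
--     DOCUMENT_STRUCTURE = "document_structure"
--
-- def _generate_learning_objectives(document_purpose: str, key_concepts: List[str],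
--                                 analysis_type: AnalysisType) -> List[str]:
--     """Generate educational learning objectives"""
--     objectives = []
--
--     if analysis_type == AnalysisType.EDUCATIONAL_SUMMARY:
--         objectives.append("Understand the structure and purpose of legal documents")
--         objectives.append("Recognize common legal terminology and concepts")
--
--     if analysis_type == AnalysisType.METADATA_EXTRACTION:
--         objectives.append("Learn to identify key information in legal documents")
--         objectives.append("Understand the importance of dates and parties in legal proceedings")
--
--     if analysis_type == AnalysisType.PROCEDURAL_OVERVIEW:
--         objectives.append("Understand basic legal procedures and requirements")
--         objectives.append("Learn about court processes and documentation")
--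
--     # Add concept-specific objectives
--     if any('bankruptcy' in concept.lower() for concept in key_concepts):
--         objectives.append("Gain educational insight into bankruptcy procedures")
--
--     if any('motion' in concept.lower() for concept in key_concepts):
--         objectives.append("Learn about the motion practice in legal proceedings")
--
--     # Always include compliance objective
--     objectives.append("Understand the importance of seeking qualified legal counsel")
--
--     return objectives[:5]  # Limit to 5 objectives
-- ===== SOURCE B (Python) =====
-- from typing import List
--
-- # A uniform rule table: each objective is guarded by a predicate over
-- # (analysis_type, key_concepts); the result is one filter pass over it.
-- _RULES = [
--     (lambda t, k: t == "educational_summary",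
--      "Understand the structure and purpose of legal documents"),
--     (lambda t, k: t == "educational_summary",
--      "Recognize common legal terminology and concepts"),
--     (lambda t, k: t == "metadata_extraction",
--      "Learn to identify key information in legal documents"),
--     (lambda t, k: t == "metadata_extraction",
--      "Understand the importance of dates and parties in legal proceedings"),
--     (lambda t, k: t == "procedural_overview",
--      "Understand basic legal procedures and requirements"),
--     (lambda t, k: t == "procedural_overview",
--      "Learn about court processes and documentation"),
--     (lambda t, k: any('bankruptcy' in c.lower() for c in k),
--      "Gain educational insight into bankruptcy procedures"),
--     (lambda t, k: any('motion' in c.lower() for c in k),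
--      "Learn about the motion practice in legal proceedings"),
--     (lambda t, k: True,
--      "Understand the importance of seeking qualified legal counsel"),
-- ]
--
-- def _generate_learning_objectives(document_purpose: str, key_concepts: List[str],
--                                   analysis_type) -> List[str]:
--     return [text for applies, text in _RULES if applies(analysis_type, key_concepts)]
-- ===== Notes on version B (the rewrite author's own statement) =====
-- stated objective: idiomatic
-- what changed: Replaces the imperative append chain with a declarative rule table of (predicate, objective) pairs and a single filter comprehension over it, and drops the [:5] slice, which never truncates since at most 5 rules can fire at once.
import Mathlib
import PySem

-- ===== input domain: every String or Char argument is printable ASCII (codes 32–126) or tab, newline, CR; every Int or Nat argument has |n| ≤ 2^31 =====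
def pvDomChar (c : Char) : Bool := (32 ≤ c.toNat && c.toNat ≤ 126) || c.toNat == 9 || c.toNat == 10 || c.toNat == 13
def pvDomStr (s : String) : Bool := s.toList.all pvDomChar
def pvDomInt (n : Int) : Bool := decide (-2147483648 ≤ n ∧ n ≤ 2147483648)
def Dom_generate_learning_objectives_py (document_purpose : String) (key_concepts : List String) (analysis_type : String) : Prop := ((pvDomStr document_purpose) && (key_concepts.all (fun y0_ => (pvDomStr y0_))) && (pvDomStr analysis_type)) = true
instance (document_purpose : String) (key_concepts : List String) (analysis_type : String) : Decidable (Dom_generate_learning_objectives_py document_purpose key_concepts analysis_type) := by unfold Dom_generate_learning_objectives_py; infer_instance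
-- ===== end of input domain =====

-- B replaces A's imperative append chain with a declarative rule table of (predicate, objective)
-- pairs filtered in one pass; the final [:5] is dropped (it never truncates). Objective: idiomatic.


-- ===== PORT A =====
def generate_learning_objectives_py (document_purpose : String) (key_concepts : List String) (analysis_type : String) : List String :=
  let objectives : List String := []
  let objectives := if analysis_type == "educational_summary" then
      objectives ++ ["Understand the structure and purpose of legal documents",
                     "Recognize common legal terminology and concepts"] else objectives
  let objectives := if analysis_type == "metadata_extraction" then
      objectives ++ ["Learn to identify key information in legal documents",
                     "Understand the importance of dates and parties in legal proceedings"] else objectives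
  let objectives := if analysis_type == "procedural_overview" then
      objectives ++ ["Understand basic legal procedures and requirements",
                     "Learn about court processes and documentation"] else objectives
  let objectives := if key_concepts.any (fun concept => PySem.Str.isIn "bankruptcy" (PySem.Str.lower concept)) then
      objectives ++ ["Gain educational insight into bankruptcy procedures"] else objectives
  let objectives := if key_concepts.any (fun concept => PySem.Str.isIn "motion" (PySem.Str.lower concept)) then
      objectives ++ ["Learn about the motion practice in legal proceedings"] else objectives
  let objectives := objectives ++ ["Understand the importance of seeking qualified legal counsel"]
  PySem.List.slice objectives none (some 5)

-- ===== PORT B =====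
-- the module-level rule table of Source B: (predicate over (analysis_type, key_concepts), objective)
def pvRules : List ((String → List String → Bool) × String) :=
  [(fun t _ => t == "educational_summary",
    "Understand the structure and purpose of legal documents"),
   (fun t _ => t == "educational_summary",
    "Recognize common legal terminology and concepts"),
   (fun t _ => t == "metadata_extraction",
    "Learn to identify key information in legal documents"),
   (fun t _ => t == "metadata_extraction",
    "Understand the importance of dates and parties in legal proceedings"),
   (fun t _ => t == "procedural_overview",
    "Understand basic legal procedures and requirements"),
   (fun t _ => t == "procedural_overview",
    "Learn about court processes and documentation"),
   (fun _ k => k.any (fun c => PySem.Str.isIn "bankruptcy" (PySem.Str.lower c)),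
    "Gain educational insight into bankruptcy procedures"),
   (fun _ k => k.any (fun c => PySem.Str.isIn "motion" (PySem.Str.lower c)),
    "Learn about the motion practice in legal proceedings"),
   (fun _ _ => true,
    "Understand the importance of seeking qualified legal counsel")]

def generate_learning_objectives_py_alt (document_purpose : String) (key_concepts : List String) (analysis_type : String) : List String :=
  (pvRules.filter (fun r => r.1 analysis_type key_concepts)).map Prod.snd

-- ===== PRECONDITION & SPEC =====
def Spec_generate_learning_objectives_py (document_purpose : String) (key_concepts : List String) (analysis_type : String) (out : List String) : Prop := out = generate_learning_objectives_py_alt document_purpose key_concepts analysis_type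
instance (document_purpose : String) (key_concepts : List String) (analysis_type : String) (out : List String) : Decidable (Spec_generate_learning_objectives_py document_purpose key_concepts analysis_type out) := by unfold Spec_generate_learning_objectives_py; infer_instance

-- ===== CLAIM (what is proved, stated in full; the proofs are below) =====
def Claim_equal_generate_learning_objectives_py : Prop := ∀ (document_purpose : String) (key_concepts : List String) (analysis_type : String), Dom_generate_learning_objectives_py document_purpose key_concepts analysis_type → Spec_generate_learning_objectives_py document_purpose key_concepts analysis_type (generate_learning_objectives_py document_purpose key_concepts analysis_type)

-- ===== LEMMAS AND PROOFS =====
theorem pv_slice5 (xs : List String) (h : xs.length ≤ 5) :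
    PySem.List.slice xs none (some 5) = xs := by
  rw [PySem.List.slice_to]
  · simpa using List.take_of_length_le (by simpa using h)
  · norm_num

-- ===== VERDICT (by name: the statement is the Claim_ definition above) =====
theorem generate_learning_objectives_py_spec : Claim_equal_generate_learning_objectives_py := by
  intro dp kc at_ _
  unfold Spec_generate_learning_objectives_py
  unfold generate_learning_objectives_py generate_learning_objectives_py_alt pvRules
  by_cases h1 : at_ = "educational_summary"
  · subst h1
    cases hb : kc.any (fun concept => PySem.Str.isIn "bankruptcy" (PySem.Str.lower concept)) <;>
    cases hm : kc.any (fun concept => PySem.Str.isIn "motion" (PySem.Str.lower concept)) <;>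
      simp only [List.filter_cons, List.filter_nil, hb, hm] <;> simp [pv_slice5]
  · by_cases h2 : at_ = "metadata_extraction"
    · subst h2
      cases hb : kc.any (fun concept => PySem.Str.isIn "bankruptcy" (PySem.Str.lower concept)) <;>
      cases hm : kc.any (fun concept => PySem.Str.isIn "motion" (PySem.Str.lower concept)) <;>
        simp only [List.filter_cons, List.filter_nil, hb, hm] <;> simp [pv_slice5]
    · by_cases h3 : at_ = "procedural_overview"
      · subst h3
        cases hb : kc.any (fun concept => PySem.Str.isIn "bankruptcy" (PySem.Str.lower concept)) <;>
        cases hm : kc.any (fun concept => PySem.Str.isIn "motion" (PySem.Str.lower concept)) <;>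
          simp only [List.filter_cons, List.filter_nil, hb, hm] <;> simp [pv_slice5]
      · have e1 : (at_ == "educational_summary") = false := by simp [h1]
        have e2 : (at_ == "metadata_extraction") = false := by simp [h2]
        have e3 : (at_ == "procedural_overview") = false := by simp [h3]
        cases hb : kc.any (fun concept => PySem.Str.isIn "bankruptcy" (PySem.Str.lower concept)) <;>
        cases hm : kc.any (fun concept => PySem.Str.isIn "motion" (PySem.Str.lower concept)) <;>
          simp only [List.filter_cons, List.filter_nil, hb, hm, e1, e2, e3] <;> simp [pv_slice5]
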